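-- pv_equiv track=rewrite | github.com/varennes/singlecell-cpm | python/moduleEnergy.py | calcPerimeter
-- ===== SOURCE A (Python) =====
-- def calcPerimeter( rCell):
--     nnMove = [[1,0], [0,1], [-1,0], [0,-1]]
--     perim = 0
--     perimList = []
--     for lattice in rCell:
--         perimCheck = 0
--         for nn in nnMove:
--             latticeNN = []
--             latticeNN.append( lattice[0] + nn[0])
--             latticeNN.append( lattice[1] + nn[1])
--             if latticeNN in rCell:
--                 pass
--             else:
--                 perimCheck += 1
--         if perimCheck > 0:
--             perim += perimCheck
--             perimList.append( lattice)
--     return perimList, perim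
-- ===== SOURCE B (Python) =====
-- def calcPerimeter(rCell):
--     # Hash-based: set of occupied sites, then scatter neighbor counts into a dict,
--     # then one pass over rCell reading 4 - (#occupied neighbors).
--     occ = {(s[0], s[1]) for s in rCell if len(s) == 2}
--     adj = {}
--     for (x, y) in occ:
--         for q in ((x + 1, y), (x, y + 1), (x - 1, y), (x, y - 1)):
--             adj[q] = adj.get(q, 0) + 1
--     perim = 0
--     perimList = []
--     for site in rCell:
--         perimCheck = 4 - adj.get((site[0], site[1]), 0)
--         if perimCheck > 0:
--             perim += perimCheck
--             perimList.append(site)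
--     return perimList, perim
-- ===== Notes on version B (the rewrite author's own statement) =====
-- stated objective: faster
-- what changed: Replaces the per-site per-neighbor linear membership scan over rCell with a hash set of occupied sites plus a precomputed neighbor-incidence counter dict, read back in a single output pass (perimCheck = 4 - occupied-neighbor count).
import Mathlib
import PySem

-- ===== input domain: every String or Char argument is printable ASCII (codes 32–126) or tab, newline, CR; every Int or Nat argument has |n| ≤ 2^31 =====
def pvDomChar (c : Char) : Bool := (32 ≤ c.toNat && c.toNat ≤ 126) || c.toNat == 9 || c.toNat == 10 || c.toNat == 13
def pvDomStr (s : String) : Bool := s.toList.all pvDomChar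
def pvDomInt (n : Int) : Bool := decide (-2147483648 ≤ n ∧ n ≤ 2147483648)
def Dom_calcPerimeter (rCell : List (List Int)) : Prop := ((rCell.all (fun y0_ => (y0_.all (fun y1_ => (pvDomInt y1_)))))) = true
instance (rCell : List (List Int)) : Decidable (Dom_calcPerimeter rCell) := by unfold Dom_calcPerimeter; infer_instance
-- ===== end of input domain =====

-- B replaces A's quadratic per-neighbor membership scans over rCell by a set of
-- occupied sites and a precomputed neighbor-incidence counter (objective: faster).

-- ===== PORT A =====
def calcPerimeter (rCell : List (List Int)) : List (List Int) × Int :=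
  let nnMove : List (List Int) := [[1,0], [0,1], [-1,0], [0,-1]]
  let st := rCell.foldl (fun (st : Int × List (List Int)) lattice =>
    let perimCheck := nnMove.foldl (fun (pc : Int) nn =>
      let latticeNN : List Int :=
        [PySem.List.pyGetD lattice 0 0 + PySem.List.pyGetD nn 0 0,
         PySem.List.pyGetD lattice 1 0 + PySem.List.pyGetD nn 1 0]
      if latticeNN ∈ rCell then pc else pc + 1) 0
    if perimCheck > 0 then (st.1 + perimCheck, st.2 ++ [lattice]) else st) (0, [])
  (st.2, st.1)

-- ===== PORT B =====
def calcPerimeter_alt (rCell : List (List Int)) : List (List Int) × Int :=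
  let occ : PySem.Set (Int × Int) :=
    PySem.Set.ofList ((rCell.filter (fun s => s.length == 2)).map
      (fun s => (PySem.List.pyGetD s 0 0, PySem.List.pyGetD s 1 0)))
  let adj : PySem.Dict (Int × Int) Int :=
    occ.foldl (fun d p =>
      [(p.1 + 1, p.2), (p.1, p.2 + 1), (p.1 - 1, p.2), (p.1, p.2 - 1)].foldl
        (fun d q => d.insert q (d.getD q 0 + 1)) d) PySem.Dict.empty
  let st := rCell.foldl (fun (st : Int × List (List Int)) site =>
    let perimCheck : Int :=
      4 - adj.getD (PySem.List.pyGetD site 0 0, PySem.List.pyGetD site 1 0) 0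
    if perimCheck > 0 then (st.1 + perimCheck, st.2 ++ [site]) else st) (0, [])
  (st.2, st.1)

-- ===== PRECONDITION & SPEC =====
-- Pre_ excludes exactly the inputs with a site of fewer than two coordinates, on which
-- the Python A raises IndexError at lattice[0]/lattice[1].
def Pre_calcPerimeter (rCell : List (List Int)) : Prop := ∀ s ∈ rCell, 2 ≤ s.length
instance (rCell : List (List Int)) : Decidable (Pre_calcPerimeter rCell) := by unfold Pre_calcPerimeter; infer_instance
def pvWitness_calcPerimeter : List (List Int) := [[0,0],[1,0],[0,1]]
def Spec_calcPerimeter (rCell : List (List Int)) (out : List (List Int) × Int) : Prop := out = calcPerimeter_alt rCell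
instance (rCell : List (List Int)) (out : List (List Int) × Int) : Decidable (Spec_calcPerimeter rCell out) := by unfold Spec_calcPerimeter; infer_instance

-- ===== CLAIM (what is proved, stated in full; the proofs are below) =====
def Claim_equal_calcPerimeter : Prop := ∀ (rCell : List (List Int)), Dom_calcPerimeter rCell → Pre_calcPerimeter rCell → Spec_calcPerimeter rCell (calcPerimeter rCell)

-- ===== LEMMAS AND PROOFS =====

-- the four lattice neighbors of a point
def pvNbr (q : Int × Int) : List (Int × Int) :=
  [(q.1 + 1, q.2), (q.1, q.2 + 1), (q.1 - 1, q.2), (q.1, q.2 - 1)]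

lemma pvNbr_count (p q : Int × Int) :
    (pvNbr p).count q = if p ∈ pvNbr q then 1 else 0 := by
  rcases p with ⟨a, b⟩; rcases q with ⟨c, d⟩
  simp only [pvNbr, List.count_cons, List.count_nil, List.mem_cons,
    Prod.mk.injEq, beq_iff_eq, List.not_mem_nil, or_false]
  split_ifs <;> omega

lemma pvNbr_nodup (q : Int × Int) : (pvNbr q).Nodup := by
  rcases q with ⟨a, b⟩
  simp [pvNbr, Prod.ext_iff]
  omega

lemma pv_adj_getD (L : List (Int × Int)) (d : PySem.Dict (Int × Int) Int) (q : Int × Int) :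
    (L.foldl (fun d p =>
        (pvNbr p).foldl (fun d q' => d.insert q' (d.getD q' 0 + 1)) d) d).getD q 0
      = d.getD q 0 + (L.countP (fun p => decide (p ∈ pvNbr q)) : Int) := by
  induction L generalizing d with
  | nil => simp
  | cons p L ih =>
    simp only [List.foldl_cons, ih, PySem.Dict.getD_foldl_insert_add_one,
      List.countP_cons, pvNbr_count]
    rcases Decidable.em (p ∈ pvNbr q) with h | h <;> simp [h] <;> ring

lemma pv_countP_comm {α : Type} [BEq α] [LawfulBEq α] [DecidableEq α] (l1 l2 : List α)
    (h1 : l1.Nodup) (h2 : l2.Nodup) :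
    l1.countP (fun a => decide (a ∈ l2)) = l2.countP (fun a => decide (a ∈ l1)) := by
  have key : ∀ (u v : List α), u.Nodup → v.Nodup →
      u.countP (fun a => decide (a ∈ v)) = (u.toFinset ∩ v.toFinset).card := by
    intro u v hu hv
    rw [List.countP_eq_length_filter]
    have hnd : (u.filter (fun a => decide (a ∈ v))).Nodup := hu.filter _
    rw [← List.toFinset_card_of_nodup hnd]
    congr 1
    ext x
    simp [Finset.mem_inter]
  rw [key l1 l2 h1 h2, key l2 l1 h2 h1, Finset.inter_comm]

def pvOcc (rCell : List (List Int)) : PySem.Set (Int × Int) :=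
  PySem.Set.ofList ((rCell.filter (fun s => s.length == 2)).map
    (fun s => (PySem.List.pyGetD s 0 0, PySem.List.pyGetD s 1 0)))

lemma pv_mem_occ (rCell : List (List Int)) (a b : Int) :
    (a, b) ∈ pvOcc rCell ↔ [a, b] ∈ rCell := by
  unfold pvOcc
  rw [PySem.Set.mem_ofList]
  simp only [List.mem_map, List.mem_filter, beq_iff_eq]
  constructor
  · rintro ⟨s, ⟨hs, hlen⟩, hproj⟩
    match s, hlen with
    | [u, v], _ =>
      simp only [PySem.List.pyGetD, PySem.List.pyGet?, PySem.List.pyIdx?] at hproj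
      simp only [List.length_cons, List.length_nil] at hproj
      norm_num at hproj
      obtain ⟨hu, hv⟩ := hproj
      subst hu; subst hv
      exact hs
  · intro h
    exact ⟨[a, b], ⟨h, rfl⟩, by simp [PySem.List.pyGetD, PySem.List.pyGet?, PySem.List.pyIdx?]⟩

lemma pv_perimCheck (rCell : List (List Int)) (x : List Int) :
    ([[1,0], [0,1], [-1,0], [0,-1]] : List (List Int)).foldl (fun (pc : Int) nn =>
        if [PySem.List.pyGetD x 0 0 + PySem.List.pyGetD nn 0 0,
            PySem.List.pyGetD x 1 0 + PySem.List.pyGetD nn 1 0] ∈ rCell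
        then pc else pc + 1) 0
      = 4 - ((pvOcc rCell).foldl (fun d p =>
          (pvNbr p).foldl (fun d q' => d.insert q' (d.getD q' 0 + 1)) d)
          PySem.Dict.empty).getD (PySem.List.pyGetD x 0 0, PySem.List.pyGetD x 1 0) 0 := by
  set a := PySem.List.pyGetD x 0 0
  set b := PySem.List.pyGetD x 1 0
  rw [pv_adj_getD]
  have hnd : (pvOcc rCell).Nodup := PySem.Set.nodup_ofList _
  rw [show List.countP (fun p => decide (p ∈ pvNbr (a, b))) (pvOcc rCell)
        = (pvNbr (a, b)).countP (fun p => decide (p ∈ pvOcc rCell)) from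
      pv_countP_comm _ _ hnd (pvNbr_nodup _)]
  have h1 : ∀ n : Int × Int, n ∈ pvOcc rCell ↔ [n.1, n.2] ∈ rCell := by
    intro n; rcases n with ⟨c, d⟩; exact pv_mem_occ rCell c d
  simp only [pvNbr, List.countP_cons, List.countP_nil, h1,
    List.foldl_cons, List.foldl_nil, PySem.Dict.getD_empty,
    PySem.List.pyGetD]
  norm_num
  simp only [← sub_eq_add_neg]
  by_cases m1 : [a + 1, b] ∈ rCell <;> by_cases m2 : [a, b + 1] ∈ rCell <;>
    by_cases m3 : [a - 1, b] ∈ rCell <;> by_cases m4 : [a, b - 1] ∈ rCell <;>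
    simp only [m1, m2, m3, m4, if_true, if_false] <;> norm_num

-- the common loop body of the two final passes, written in A's and B's form
lemma pv_step (rCell : List (List Int)) (st : Int × List (List Int)) (x : List Int) :
    (if (([[1,0], [0,1], [-1,0], [0,-1]] : List (List Int)).foldl (fun (pc : Int) nn =>
          if [PySem.List.pyGetD x 0 0 + PySem.List.pyGetD nn 0 0,
              PySem.List.pyGetD x 1 0 + PySem.List.pyGetD nn 1 0] ∈ rCell
          then pc else pc + 1) 0) > 0
     then (st.1 + (([[1,0], [0,1], [-1,0], [0,-1]] : List (List Int)).foldl (fun (pc : Int) nn =>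
          if [PySem.List.pyGetD x 0 0 + PySem.List.pyGetD nn 0 0,
              PySem.List.pyGetD x 1 0 + PySem.List.pyGetD nn 1 0] ∈ rCell
          then pc else pc + 1) 0), st.2 ++ [x]) else st)
    = (if (4 - ((PySem.Set.ofList ((rCell.filter (fun s => s.length == 2)).map
            (fun s => (PySem.List.pyGetD s 0 0, PySem.List.pyGetD s 1 0)))).foldl (fun d p =>
          [(p.1 + 1, p.2), (p.1, p.2 + 1), (p.1 - 1, p.2), (p.1, p.2 - 1)].foldl
            (fun d q => d.insert q (d.getD q 0 + 1)) d)
            (PySem.Dict.empty : PySem.Dict (Int × Int) Int)).getD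
            (PySem.List.pyGetD x 0 0, PySem.List.pyGetD x 1 0) 0) > 0
     then (st.1 + (4 - ((PySem.Set.ofList ((rCell.filter (fun s => s.length == 2)).map
            (fun s => (PySem.List.pyGetD s 0 0, PySem.List.pyGetD s 1 0)))).foldl (fun d p =>
          [(p.1 + 1, p.2), (p.1, p.2 + 1), (p.1 - 1, p.2), (p.1, p.2 - 1)].foldl
            (fun d q => d.insert q (d.getD q 0 + 1)) d)
            (PySem.Dict.empty : PySem.Dict (Int × Int) Int)).getD
            (PySem.List.pyGetD x 0 0, PySem.List.pyGetD x 1 0) 0), st.2 ++ [x]) else st) := by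
  have h := pv_perimCheck rCell x
  unfold pvOcc pvNbr at h
  rw [h]

-- ===== VERDICT (by name: the statement is the Claim_ definition above) =====
theorem calcPerimeter_spec : Claim_equal_calcPerimeter := by
  intro rCell _hdom _hpre
  unfold Spec_calcPerimeter
  simp only [calcPerimeter, calcPerimeter_alt]
  simp only [pv_step rCell]
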